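-- pv_equiv track=rewrite | github.com/akishwe/dsa-practice | python/second_non_repeating_character.py | second_non_repeating_character
-- ===== SOURCE A (Python) =====
-- def second_non_repeating_character(string):
--     # Create a empty dictionary to store character frequencies
--     freq = {}
--
--     # Loop through each character in the string
--     for char in string:
--
--         # Check if the character already exists in the dictionary
--         if char in freq:
--             # If it exists increment its count by 1
--             freq[char] = freq[char] + 1
--         else:
--             # If it does not exist, add it to the dictionary with count 1
--             freq[char] = 1
--
--     # Variable to count how many non repeating character have been found
--     count = 0
--
--     # Loop through the string again to maintain the order of each character
--     for char in string:
--         # Check if the character's frequency is 1 (non-repeating)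
--         if freq[char] == 1:
--             # Increment the non-repeating character count
--             count += 1
--
--             # If this is the second non-repeating character, return it
--             if count == 2:
--                 return char
--
--     return -1
-- ===== SOURCE B (Python) =====
-- def second_non_repeating_character(string):
--     # Single pass: keep the chars seen exactly once so far (in order) and the repeated ones.
--     once = []          # chars seen exactly once so far, in encounter order
--     repeated = set()   # chars seen more than once
--     for ch in string:
--         if ch in repeated:
--             continue
--         if ch in once:
--             once.remove(ch)
--             repeated.add(ch)
--         else:
--             once.append(ch)
--     return once[1] if len(once) > 1 else -1
-- ===== Notes on version B (the rewrite author's own statement) =====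
-- stated objective: faster
-- what changed: A counts every character in a dict and then rescans the whole string; B makes a single pass keeping an ordered list of chars seen exactly once (deleting on a repeat) plus a repeated-set, then indexes that list.
-- outside the precondition, e.g. on second_non_repeating_character('aabb'): A returns -1, B returns -1
import Mathlib
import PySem

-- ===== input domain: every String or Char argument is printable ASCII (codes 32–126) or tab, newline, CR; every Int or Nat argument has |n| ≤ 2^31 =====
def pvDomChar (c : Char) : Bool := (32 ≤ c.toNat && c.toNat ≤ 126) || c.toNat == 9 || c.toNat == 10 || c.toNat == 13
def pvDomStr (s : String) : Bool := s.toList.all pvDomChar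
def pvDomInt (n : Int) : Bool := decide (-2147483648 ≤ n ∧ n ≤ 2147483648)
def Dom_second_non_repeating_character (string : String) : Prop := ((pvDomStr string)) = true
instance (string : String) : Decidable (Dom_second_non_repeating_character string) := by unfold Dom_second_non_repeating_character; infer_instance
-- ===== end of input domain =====

-- B replaces A's count-dict-then-rescan (two passes) with a single pass keeping the chars
-- seen exactly once so far (ordered, delete-on-repeat) plus a repeated-set; measured faster.

-- ===== PORT A =====
-- second loop of A: walk the string with the running non-repeating count, return at count == 2
def snrcScan (freq : PySem.Dict Char Int) : List Char → Int → String
  | [], _ => ""                                   -- Python's 'return -1' (not a str); outside Pre_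
  | c :: rest, count =>
    if freq.getD c 0 == 1 then
      if count + 1 == 2 then String.ofList [c]
      else snrcScan freq rest (count + 1)
    else snrcScan freq rest count

def second_non_repeating_character (string : String) : String :=
  let freq := string.toList.foldl
    (fun d c => if d.contains c then d.insert c (d.getD c 0 + 1) else d.insert c 1)
    PySem.Dict.empty
  snrcScan freq string.toList 0

-- ===== PORT B =====
-- B's single pass: once = chars seen exactly once so far (in order), rep = repeated chars.
-- 'once.remove(ch)' is ported as List.erase (remove first occurrence): exact since the
-- branch guarantees ch ∈ once, where Python's list.remove cannot raise.
def snrcLoop : List Char → List Char → PySem.Set Char → List Char × PySem.Set Char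
  | [], once, rep => (once, rep)
  | c :: rest, once, rep =>
    if c ∈ rep then snrcLoop rest once rep
    else if c ∈ once then snrcLoop rest (once.erase c) (PySem.Set.add rep c)
    else snrcLoop rest (once ++ [c]) rep

def second_non_repeating_character_alt (string : String) : String :=
  let st := snrcLoop string.toList [] PySem.Set.empty
  if 1 < PySem.List.len st.1 then String.ofList [PySem.List.pyGetD st.1 1 ' ']
  else ""                                         -- Python's 'return -1' (not a str); outside Pre_

-- ===== PRECONDITION & SPEC =====
-- Pre_ excludes exactly the strings with fewer than two non-repeating characters, on which
-- Python A returns the int -1 instead of a str (not a value of the declared return type).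
def Pre_second_non_repeating_character (string : String) : Prop :=
  2 ≤ (string.toList.filter (fun c => string.toList.count c == 1)).length
instance (string : String) : Decidable (Pre_second_non_repeating_character string) := by
  unfold Pre_second_non_repeating_character; infer_instance

def pvWitness_second_non_repeating_character : String := "ab"

def Spec_second_non_repeating_character (string : String) (out : String) : Prop := out = second_non_repeating_character_alt string
instance (string : String) (out : String) : Decidable (Spec_second_non_repeating_character string out) := by unfold Spec_second_non_repeating_character; infer_instance

-- ===== CLAIM (what is proved, stated in full; the proofs are below) =====
def Claim_equal_second_non_repeating_character : Prop := ∀ (string : String), Dom_second_non_repeating_character string → Pre_second_non_repeating_character string → Spec_second_non_repeating_character string (second_non_repeating_character string)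

-- ===== LEMMAS AND PROOFS =====

-- A's frequency dict looks up to the plain count.
lemma snrc_freq_getD (l : List Char) : ∀ (d : PySem.Dict Char Int) (c : Char),
    (l.foldl (fun d c => if d.contains c then d.insert c (d.getD c 0 + 1) else d.insert c 1)
      d).getD c 0 = d.getD c 0 + l.count c := by
  induction l with
  | nil => intro d c; simp
  | cons x rest ih =>
    intro d c
    rw [List.foldl_cons, ih]
    by_cases hc : d.contains x = true
    · rw [if_pos hc, PySem.Dict.getD_insert]
      by_cases hcx : c = x
      · subst hcx; simp; ring
      · simp [hcx, Ne.symm hcx]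
    · rw [if_neg hc, PySem.Dict.getD_insert]
      by_cases hcx : c = x
      · subst hcx
        rw [PySem.Dict.getD_of_not_contains d 0 (by simpa using hc)]
        simp
        ring
      · simp [hcx, Ne.symm hcx]

-- A's second loop, entered with count = 1: first remaining char with freq 1.
lemma snrc_scan_one (freq : PySem.Dict Char Int) (l : List Char) :
    snrcScan freq l 1 =
      (match l.filter (fun c => freq.getD c 0 == 1) with
       | a :: _ => String.ofList [a]
       | [] => "") := by
  induction l with
  | nil => simp [snrcScan]
  | cons c rest ih =>
    by_cases h : (freq.getD c 0 == 1) = true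
    · simp [snrcScan, h]
    · simp [snrcScan, h, ih]

-- A's second loop from count = 0: the second char with freq 1.
lemma snrc_scan_zero (freq : PySem.Dict Char Int) (l : List Char) :
    snrcScan freq l 0 =
      (match l.filter (fun c => freq.getD c 0 == 1) with
       | _ :: b :: _ => String.ofList [b]
       | _ => "") := by
  induction l with
  | nil => simp [snrcScan]
  | cons c rest ih =>
    by_cases h : (freq.getD c 0 == 1) = true
    · rw [snrcScan]
      simp only [h, if_true]
      rw [show ((0 : Int) + 1 == 2) = false from by decide]
      simp only [Bool.false_eq_true, if_false]
      rw [show (0 : Int) + 1 = 1 from rfl, snrc_scan_one, List.filter_cons]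
      simp only [h, if_true]
      cases rest.filter (fun c => freq.getD c 0 == 1) <;> simp
    · simp [snrcScan, h, ih]

-- erasing the unique occurrence of c from a filtered list = filtering with c additionally banned
lemma filter_erase_unique (p : List Char) (f g : Char → Bool) (c : Char)
    (hc : p.count c = 1) (hf : f c = true) (hg : g c = false)
    (hfg : ∀ x, x ≠ c → g x = f x) :
    p.filter g = (p.filter f).erase c := by
  induction p with
  | nil => simp
  | cons x rest ih =>
    by_cases hx : x = c
    · subst hx
      have hrest : rest.count x = 0 := by
        have := hc; simp at this ⊢; omega
      have : rest.filter g = rest.filter f := by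
        apply List.filter_congr
        intro y hy
        have hyx : y ≠ x := by
          intro h; subst h; simp [List.count_eq_zero] at hrest; exact hrest hy
        exact hfg y hyx
      simp [hg, hf, this]
    · have hcount : rest.count c = 1 := by
        have := hc; simp [hx] at this ⊢
        simpa [Ne.symm hx] using this
      have hgx : g x = f x := hfg x hx
      by_cases hfx : f x = true
      · simp [hfx, hgx, ih hcount, hx]
      · simp at hfx
        simp [hfx, hgx, ih hcount]
  
-- Bool-level congruences for the count-is-one test
lemma beq_one_congr (a b : Nat) (h : a = 1 ↔ b = 1) : (a == 1) = (b == 1) := by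
  by_cases ha : a = 1 <;> by_cases hb : b = 1 <;> simp [ha, hb] at h ⊢

lemma beq_one_false (a : Nat) (h : a ≠ 1) : (a == 1) = false := by simpa using h

-- B's loop invariant: after processing prefix p, once is the ordered list of chars
-- occurring exactly once in p, and rep holds exactly the chars occurring at least twice.
lemma snrc_loop_invariant (rest : List Char) :
    ∀ (p : List Char) (once : List Char) (rep : PySem.Set Char),
    once = p.filter (fun x => p.count x == 1) →
    (∀ x, x ∈ rep ↔ 2 ≤ p.count x) →
    (snrcLoop rest once rep).1 =
      (p ++ rest).filter (fun x => (p ++ rest).count x == 1) := by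
  induction rest with
  | nil => intro p once rep h1 _; simpa [snrcLoop] using h1
  | cons c tail ih =>
    intro p once rep h1 h2
    have key : ∀ x : Char, (p ++ [c]).count x = p.count x + (if x = c then 1 else 0) := by
      intro x
      by_cases hx : x = c
      · simp [hx, List.count_append]
      · simp [hx, List.count_append, List.count_eq_zero]
    by_cases hrep : c ∈ rep
    · -- c already repeated: state unchanged
      have hcnt : 2 ≤ p.count c := (h2 c).1 hrep
      rw [snrcLoop]
      simp only [hrep, if_true]
      have hgf : ∀ y ∈ p, ((p ++ [c]).count y == 1) = (p.count y == 1) := by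
        intro y _
        rw [key]
        by_cases hyc : y = c
        · subst hyc; exact beq_one_congr _ _ (by omega)
        · simp [hyc]
      have h1' : once = (p ++ [c]).filter (fun x => (p ++ [c]).count x == 1) := by
        rw [List.filter_append, List.filter_congr hgf, ← h1]
        have hgc : ((p ++ [c]).count c == 1) = false := beq_one_false _ (by rw [key, if_pos rfl]; omega)
        simp only [List.filter_cons, List.filter_nil, hgc]
        simp
      have h2' : ∀ x, x ∈ rep ↔ 2 ≤ (p ++ [c]).count x := by
        intro x
        rw [key]
        by_cases hxc : x = c
        · subst hxc
          rw [if_pos rfl]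
          simp only [hrep, true_iff]
          omega
        · rw [if_neg hxc]; simpa using h2 x
      have := ih (p ++ [c]) once rep h1' h2'
      simpa using this
    · by_cases honce : c ∈ once
      · -- second sighting: move c from once to rep
        have hcnt : p.count c = 1 := by
          rw [h1] at honce
          have := List.of_mem_filter honce
          simpa using this
        rw [snrcLoop]
        simp only [hrep, if_false, honce, if_true]
        have hgc : ((p ++ [c]).count c == 1) = false := beq_one_false _ (by rw [key, if_pos rfl]; omega)
        have h1' : once.erase c = (p ++ [c]).filter (fun x => (p ++ [c]).count x == 1) := by
          have hbase : (p ++ [c]).filter (fun x => (p ++ [c]).count x == 1)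
              = p.filter (fun x => (p ++ [c]).count x == 1) := by
            rw [List.filter_append]
            simp only [List.filter_cons, List.filter_nil, hgc]
            simp
          rw [h1, hbase]
          exact (filter_erase_unique p (fun x => p.count x == 1)
            (fun x => (p ++ [c]).count x == 1) c hcnt (by simp [hcnt])
            hgc
            (fun x hx => by show ((p ++ [c]).count x == 1) = (p.count x == 1)
                            rw [key, if_neg hx]; simp)).symm
        have h2' : ∀ x, x ∈ PySem.Set.add rep c ↔ 2 ≤ (p ++ [c]).count x := by
          intro x
          rw [PySem.Set.mem_add, key]
          by_cases hxc : x = c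
          · subst hxc
            rw [if_pos rfl]
            simp only [or_true, true_iff]
            omega
          · rw [if_neg hxc]
            simp only [hxc, or_false]
            simpa using h2 x
        have := ih (p ++ [c]) (once.erase c) (PySem.Set.add rep c) h1' h2'
        simpa using this
      · -- first sighting: append c to once
        have hcnt : p.count c = 0 := by
          by_contra h
          rcases Nat.lt_or_ge (p.count c) 2 with hlt | hge
          · have h1c : p.count c = 1 := by omega
            apply honce
            rw [h1]
            exact List.mem_filter.2 ⟨List.count_pos_iff.1 (by omega), by simp [h1c]⟩
          · exact hrep ((h2 c).2 hge)
        rw [snrcLoop]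
        simp only [hrep, if_false, honce]
        have hgf : ∀ y ∈ p, ((p ++ [c]).count y == 1) = (p.count y == 1) := by
          intro y hy
          rw [key]
          by_cases hyc : y = c
          · subst hyc
            exact absurd (List.count_pos_iff.2 hy) (by omega)
          · simp [hyc]
        have h1' : once ++ [c] = (p ++ [c]).filter (fun x => (p ++ [c]).count x == 1) := by
          rw [List.filter_append, List.filter_congr hgf, ← h1]
          have hgc : ((p ++ [c]).count c == 1) = true := by rw [key, if_pos rfl]; simp [hcnt]
          simp only [List.filter_cons, List.filter_nil, hgc]
          simp
        have h2' : ∀ x, x ∈ rep ↔ 2 ≤ (p ++ [c]).count x := by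
          intro x
          rw [key]
          by_cases hxc : x = c
          · subst hxc
            rw [if_pos rfl]
            simp only [hrep, false_iff]
            omega
          · rw [if_neg hxc]; simpa using h2 x
        have := ih (p ++ [c]) (once ++ [c]) rep h1' h2'
        simpa using this

-- ===== VERDICT (by name: the statement is the Claim_ definition above) =====
theorem second_non_repeating_character_spec : Claim_equal_second_non_repeating_character := by
  intro s _ hpre
  unfold Spec_second_non_repeating_character
  unfold second_non_repeating_character second_non_repeating_character_alt
  set l := s.toList with hl
  have hfin : (snrcLoop l [] PySem.Set.empty).1
      = l.filter (fun x => l.count x == 1) := by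
    have := snrc_loop_invariant l [] [] PySem.Set.empty (by simp) (by simp [PySem.Set.empty])
    simpa using this
  have hA : snrcScan (l.foldl
      (fun d c => if d.contains c then d.insert c (d.getD c 0 + 1) else d.insert c 1)
      PySem.Dict.empty) l 0 =
      (match l.filter (fun c => l.count c == 1) with
       | _ :: b :: _ => String.ofList [b]
       | _ => "") := by
    rw [snrc_scan_zero]
    congr 1
    apply List.filter_congr
    intro x _
    rw [snrc_freq_getD]
    simp only [PySem.Dict.getD_empty, zero_add]
    by_cases hx : l.count x = 1
    · simp [hx]
    · have h1 : (l.count x == 1) = false := by simpa using hx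
      have h2 : (((l.count x : Int)) == 1) = false := by
        simp only [beq_eq_false_iff_ne, ne_eq]
        exact_mod_cast hx
      rw [h1, h2]
  simp only []
  rw [hA, hfin]
  unfold Pre_second_non_repeating_character at hpre
  rw [← hl] at hpre
  rcases hfil : l.filter (fun c => l.count c == 1) with _ | ⟨a, _ | ⟨b, rest2⟩⟩ <;>
      rw [hfil] at hpre
  · simp at hpre
  · simp at hpre
  · have hlen : 1 < PySem.List.len (a :: b :: rest2) := by
      simp [PySem.List.len_eq]
    rw [if_pos hlen]
    have hget : PySem.List.pyGetD (a :: b :: rest2) 1 ' ' = b := by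
      rw [PySem.List.pyGetD_ofNat']
      rfl
    rw [hget]
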